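-- pv_equiv track=rewrite | github.com/tr1ten/DNA | companies/amazon/multi_graph.py | solve
-- ===== SOURCE A (Python) =====
-- def solve(A,n,m):
--     maxs = [float('-inf')]*m # find highest value for each column
--     for i in range(n):
--         for j in range(m):
--             maxs[j] = max(A[i][j],maxs[j])
--     bp = -1
--     bpl = 0
--     for i in range(n): # we will find max continous sequence with highest score for each player
--         pref =0
--         mxs = 0
--         for j in range(m):
--             if A[i][j]==maxs[j]: pref +=1
--             else: pref = 0
--             mxs = max(mxs,pref)
--         if bp==-1 or bpl<mxs:
--             bp = i
--             bpl = mxs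
--     return bp+1 # 0 index
-- ===== SOURCE B (Python) =====
-- def solve(A, n, m):
--     if n <= 0:
--         return 0
--     maxs = [max(A[i][j] for i in range(n)) for j in range(m)]
--
--     def longest(bs):
--         best = 0
--         for j in range(len(bs)):
--             k = j
--             while k < len(bs) and bs[k]:
--                 k += 1
--             best = max(best, k - j)
--         return best
--
--     scores = [longest([A[i][j] == maxs[j] for j in range(m)]) for i in range(n)]
--     return scores.index(max(scores)) + 1
-- ===== Notes on version B (the rewrite author's own statement) =====
-- stated objective: alternative
-- what changed: Column maxima are computed per column with max() over a comprehension, each row's longest run is found by scanning the run length from every start position (brute force over starts) instead of a running prefix counter, and the winner is selected as scores.index(max(scores)) instead of online best-so-far tracking.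
import Mathlib
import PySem

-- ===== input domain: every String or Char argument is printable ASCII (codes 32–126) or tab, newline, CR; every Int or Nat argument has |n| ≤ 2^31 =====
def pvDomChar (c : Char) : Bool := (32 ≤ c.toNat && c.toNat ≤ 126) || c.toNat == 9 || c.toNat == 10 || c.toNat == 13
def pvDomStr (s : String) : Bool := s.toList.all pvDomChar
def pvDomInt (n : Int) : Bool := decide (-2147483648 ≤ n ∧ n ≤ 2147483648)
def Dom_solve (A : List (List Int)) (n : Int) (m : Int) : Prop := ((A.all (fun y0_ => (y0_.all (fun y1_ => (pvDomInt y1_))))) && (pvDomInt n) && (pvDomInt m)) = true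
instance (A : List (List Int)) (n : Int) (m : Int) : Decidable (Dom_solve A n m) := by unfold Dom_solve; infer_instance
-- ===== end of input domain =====

-- B replaces A's row-wise running column-max updates, per-row prefix-counter DP and online
-- best-so-far tracking by per-column maxima, a brute-force scan of the run length from every
-- start position, and first-argmax selection via scores.index(max(scores)); same return value.

-- ===== PORT A =====
-- max(A[i][j], maxs[j]) where maxs[j] starts as float('-inf') (modelled as none)
def pymaxA (x : Int) (o : Option Int) : Option Int :=
  some (match o with | none => x | some y => max x y)

def solve (A : List (List Int)) (n : Int) (m : Int) : Int :=
  let maxs := (PySem.List.pyRange 0 n 1).foldl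
    (fun mx i => (PySem.List.pyRange 0 m 1).foldl
      (fun mx j => mx.set j.toNat
        (pymaxA (PySem.List.pyGetD (PySem.List.pyGetD A i []) j 0) (PySem.List.pyGetD mx j none))) mx)
    (List.replicate m.toNat none)
  let st := (PySem.List.pyRange 0 n 1).foldl
    (fun (st : Int × Int) i =>
      let pm := (PySem.List.pyRange 0 m 1).foldl
        (fun (pm : Int × Int) j =>
          let pref := if (some (PySem.List.pyGetD (PySem.List.pyGetD A i []) j 0)
                          == PySem.List.pyGetD maxs j none) then pm.1 + 1 else 0
          (pref, max pm.2 pref))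
        (0, 0)
      if st.1 == -1 || st.2 < pm.2 then (i, pm.2) else st)
    (-1, 0)
  st.1 + 1

-- ===== PORT B =====
-- the inner 'while k < len(bs) and bs[k]: k += 1' of Source B's longest
def runlenB (bs : List Bool) (k : Int) : Int :=
  if h : k < (bs.length : Int) ∧ PySem.List.pyGetD bs k false = true then runlenB bs (k + 1)
  else k
termination_by ((bs.length : Int) - k).toNat
decreasing_by omega

-- Source B's longest: brute-force scan of the run length from every start position
def longestB (bs : List Bool) : Int :=
  (PySem.List.pyRange 0 (bs.length : Int) 1).foldl
    (fun best j => max best (runlenB bs j - j)) 0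

def solve_alt (A : List (List Int)) (n : Int) (m : Int) : Int :=
  if n ≤ 0 then 0
  else
    let maxs := (PySem.List.pyRange 0 m 1).map (fun j =>
      match PySem.List.max? ((PySem.List.pyRange 0 n 1).map
          (fun i => PySem.List.pyGetD (PySem.List.pyGetD A i []) j 0)) (fun x => x) with
      | some v => v
      | none => 0)
    let scores := (PySem.List.pyRange 0 n 1).map (fun i =>
      longestB ((PySem.List.pyRange 0 m 1).map (fun j =>
        PySem.List.pyGetD (PySem.List.pyGetD A i []) j 0 == PySem.List.pyGetD maxs j 0)))
    let mx := match PySem.List.max? scores (fun x => x) with | some v => v | none => 0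
    (((PySem.List.index? scores mx).getD 0 : Nat) : Int) + 1

-- ===== PRECONDITION & SPEC =====
-- Pre_: exactly the inputs where Python A returns (it raises IndexError iff some accessed
-- row index or column index is out of range; nothing is accessed when m ≤ 0).
def Pre_solve (A : List (List Int)) (n : Int) (m : Int) : Prop :=
  0 < m → (n ≤ (A.length : Int) ∧ ∀ row ∈ A.take n.toNat, m ≤ (row.length : Int))
instance (A : List (List Int)) (n : Int) (m : Int) : Decidable (Pre_solve A n m) := by
  unfold Pre_solve; infer_instance

def pvWitness_solve : List (List Int) × Int × Int := ([[1, 2], [3, 4]], 2, 2)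

def Spec_solve (A : List (List Int)) (n : Int) (m : Int) (out : Int) : Prop := out = solve_alt A n m
instance (A : List (List Int)) (n : Int) (m : Int) (out : Int) : Decidable (Spec_solve A n m out) := by unfold Spec_solve; infer_instance

-- ===== CLAIM (what is proved, stated in full; the proofs are below) =====
def Claim_equal_solve : Prop := ∀ (A : List (List Int)) (n : Int) (m : Int), Dom_solve A n m → Pre_solve A n m → Spec_solve A n m (solve A n m)

-- ===== LEMMAS AND PROOFS =====

-- length of the leading run of true
def leadM : List Bool → Int
  | [] => 0
  | false :: _ => 0
  | true :: r => leadM r + 1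

-- maximum over all suffixes of the leading-true-run length = longest true run
def MM : List Bool → Int
  | [] => 0
  | b :: r => max (leadM (b :: r)) (MM r)

theorem leadM_nonneg (bs : List Bool) : 0 ≤ leadM bs := by
  induction bs with
  | nil => simp [leadM]
  | cons b r ih =>
    cases b
    · simp [leadM]
    · simp [leadM]; omega

theorem MM_nonneg (bs : List Bool) : 0 ≤ MM bs := by
  induction bs with
  | nil => simp [MM]
  | cons b r ih => simp [MM]; right; exact ih

theorem leadM_le_MM (bs : List Bool) : leadM bs ≤ MM bs := by
  cases bs with
  | nil => simp [MM, leadM]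
  | cons b r => simp [MM]

theorem leadM_headD_false (r : List Bool) (h : r.headD false = false) : leadM r = 0 := by
  cases r with
  | nil => rfl
  | cons b t => cases b <;> simp_all [leadM]

theorem runlen_eq (bs : List Bool) (k : Nat) : runlenB bs (k : Int) = k + leadM (bs.drop k) := by
  have H : ∀ (d k : Nat), bs.length - k ≤ d → runlenB bs (k : Int) = k + leadM (bs.drop k) := by
    intro d
    induction d with
    | zero =>
      intro k hk
      rw [runlenB, dif_neg]
      · rw [List.drop_eq_nil_of_le (by omega)]; simp [leadM]
      · rintro ⟨h1, -⟩; omega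
    | succ d ih =>
      intro k hk
      rw [runlenB]
      by_cases hlt : (k : Int) < (bs.length : Int)
      · have hk2 : k < bs.length := by exact_mod_cast hlt
        have hget : PySem.List.pyGetD bs (k : Int) false = bs[k] := by
          simp [List.getD, List.getElem?_eq_getElem hk2]
        have hdrop : bs.drop k = bs[k] :: bs.drop (k + 1) := List.drop_eq_getElem_cons hk2
        cases hb : bs[k] with
        | true =>
          rw [dif_pos ⟨hlt, by rw [hget, hb]⟩]
          have hcast : (k : Int) + 1 = ((k + 1 : Nat) : Int) := by push_cast; ring
          rw [hcast, ih (k + 1) (by omega), hdrop, hb]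
          simp [leadM]; ring
        | false =>
          rw [dif_neg (by rintro ⟨-, h2⟩; rw [hget, hb] at h2; exact Bool.false_ne_true h2)]
          rw [hdrop, hb]; simp [leadM]
      · rw [dif_neg (by rintro ⟨h1, -⟩; exact hlt h1)]
        rw [List.drop_eq_nil_of_le (by omega)]; simp [leadM]
  exact H bs.length k (by omega)

theorem FR (bs : List Bool) : ∀ (s : Int), 0 ≤ s →
    (List.range bs.length).foldl (fun best k => max best (leadM (bs.drop k))) s = max s (MM bs) := by
  induction bs with
  | nil => intro s hs; simp [MM]; omega
  | cons b r ih =>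
    intro s hs
    have hlen : (b :: r).length = r.length + 1 := rfl
    rw [hlen, List.range_succ_eq_map, List.foldl_cons, List.foldl_map]
    simp only [List.drop_succ_cons, List.drop_zero]
    rw [ih (max s (leadM (b :: r))) (by have := leadM_nonneg (b :: r); omega)]
    show max (max s (leadM (b :: r))) (MM r) = max s (MM (b :: r))
    rw [show MM (b :: r) = max (leadM (b :: r)) (MM r) from rfl]
    omega

theorem longest_eq (bs : List Bool) : longestB bs = MM bs := by
  unfold longestB
  rw [PySem.List.pyRange_one, List.foldl_map]
  simp only [zero_add, sub_zero, Int.toNat_natCast, runlen_eq, add_sub_cancel_left]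
  rw [FR bs 0 le_rfl]
  have := MM_nonneg bs; omega

theorem dpL (bs : List Bool) : ∀ (p s : Int), 0 ≤ p → 0 ≤ s →
    (bs.foldl (fun (pm : Int × Int) b =>
      ((if b then pm.1 + 1 else 0), max pm.2 (if b then pm.1 + 1 else 0))) (p, s)).2
    = max s (max (if bs.headD false then p + leadM bs else 0) (MM bs)) := by
  induction bs with
  | nil => intro p s hp hs; simp [MM]; omega
  | cons b r ih =>
    intro p s hp hs
    have h1 := leadM_le_MM r
    have h2 := MM_nonneg r
    have h0 := leadM_nonneg r
    cases b with
    | false =>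
      rw [List.foldl_cons]
      simp only [if_neg Bool.false_ne_true]
      rw [ih 0 (max s 0) le_rfl (by omega)]
      show _ = max s (max (if false = true then p + leadM (false :: r) else 0) (MM (false :: r)))
      rw [show MM (false :: r) = max (leadM (false :: r)) (MM r) from rfl]
      simp only [if_neg Bool.false_ne_true, leadM]
      by_cases hr : r.headD false = true
      · rw [if_pos hr]; omega
      · rw [if_neg hr]; omega
    | true =>
      rw [List.foldl_cons]
      simp only [if_true]
      rw [ih (p + 1) (max s (p + 1)) (by omega) (by omega)]
      show _ = max s (max (if true = true then p + leadM (true :: r) else 0) (MM (true :: r)))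
      rw [show MM (true :: r) = max (leadM (true :: r)) (MM r) from rfl]
      simp only [if_true, leadM]
      by_cases hr : r.headD false = true
      · rw [if_pos hr]; omega
      · rw [if_neg hr, leadM_headD_false r (by simpa using hr)]; omega

theorem dp_eq (bs : List Bool) :
    (bs.foldl (fun (pm : Int × Int) b =>
      ((if b then pm.1 + 1 else 0), max pm.2 (if b then pm.1 + 1 else 0))) (0, 0)).2
    = MM bs := by
  rw [dpL bs 0 0 le_rfl le_rfl]
  have h1 := leadM_le_MM bs
  have h2 := MM_nonneg bs
  by_cases hr : bs.headD false = true
  · rw [if_pos hr]; omega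
  · rw [if_neg hr]; omega

-- one inner pass of A's first loop: sets entry j to pymaxA (f j) mx[j] for each j < k
theorem innerG (f : Int → Int) : ∀ (k : Nat) (mx : List (Option Int)), k ≤ mx.length →
    (PySem.List.pyRange 0 (k : Int) 1).foldl
      (fun mx j => mx.set j.toNat (pymaxA (f j) (PySem.List.pyGetD mx j none))) mx
    = ((PySem.List.pyRange 0 (k : Int) 1).map (fun j => pymaxA (f j) (PySem.List.pyGetD mx j none)))
      ++ mx.drop k := by
  intro k
  induction k with
  | zero =>
    intro mx _
    rw [Nat.cast_zero, PySem.List.pyRange_one_eq_nil le_rfl]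
    simp
  | succ k ih =>
    intro mx hk
    have hcast : ((k + 1 : Nat) : Int) = (k : Int) + 1 := by push_cast; ring
    rw [hcast, PySem.List.pyRange_one_succ_right (by positivity), List.foldl_append,
      List.map_append, ih mx (by omega)]
    simp only [List.foldl_cons, List.foldl_nil, List.map_cons, List.map_nil]
    have hk2 : k < mx.length := by omega
    have hP : ((PySem.List.pyRange 0 (k : Int) 1).map
        (fun j => pymaxA (f j) (PySem.List.pyGetD mx j none))).length = k := by
      simp [PySem.List.length_pyRange_one]
    have hget0 : ∀ (P : List (Option Int)), P.length = k →
        PySem.List.pyGetD (P ++ mx.drop k) (k : Int) none = mx[k] := by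
      intro P hPl
      rw [PySem.List.pyGetD_natCast, List.getD_eq_getElem?_getD,
        List.getElem?_append_right (by omega), hPl, Nat.sub_self, List.getElem?_drop,
        Nat.add_zero, List.getElem?_eq_getElem hk2]
      rfl
    rw [hget0 _ hP, Int.toNat_natCast, List.set_append, if_neg (by omega), hP, Nat.sub_self,
      List.drop_eq_getElem_cons hk2, List.set_cons_zero,
      PySem.List.pyGetD_natCast, List.getD_eq_getElem?_getD, List.getElem?_eq_getElem hk2]
    simp

theorem pyRange_toNat (m : Int) :
    PySem.List.pyRange 0 m 1 = PySem.List.pyRange 0 ((m.toNat : Int)) 1 := by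
  rw [PySem.List.pyRange_one, PySem.List.pyRange_one]
  have h : (m - 0).toNat = (((m.toNat : Int)) - 0).toNat := by omega
  rw [h]

theorem inner_full (f : Int → Int) (m : Int) (mx : List (Option Int)) (h : mx.length = m.toNat) :
    (PySem.List.pyRange 0 m 1).foldl
      (fun mx j => mx.set j.toNat (pymaxA (f j) (PySem.List.pyGetD mx j none))) mx
    = (PySem.List.pyRange 0 m 1).map (fun j => pymaxA (f j) (PySem.List.pyGetD mx j none)) := by
  rw [pyRange_toNat m, ← h]
  rw [innerG f mx.length mx le_rfl, List.drop_length, List.append_nil]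

-- A's whole first loop computes, per column j, the fold of pymaxA over the rows
theorem outerG (f : Int → Int → Int) (m : Int) : ∀ (N : Nat),
    (PySem.List.pyRange 0 (N : Int) 1).foldl
      (fun mx i => (PySem.List.pyRange 0 m 1).foldl
        (fun mx j => mx.set j.toNat (pymaxA (f i j) (PySem.List.pyGetD mx j none))) mx)
      (List.replicate m.toNat none)
    = (PySem.List.pyRange 0 m 1).map
        (fun j => (PySem.List.pyRange 0 (N : Int) 1).foldl (fun o i => pymaxA (f i j) o) none) := by
  intro N
  induction N with
  | zero =>
    rw [show ((0 : Nat) : Int) = 0 by rfl, PySem.List.pyRange_one_eq_nil le_rfl]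
    simp only [List.foldl_nil]
    rw [List.map_const', PySem.List.length_pyRange_one]
    simp
  | succ N ih =>
    have hcast : ((N + 1 : Nat) : Int) = (N : Int) + 1 := by push_cast; ring
    rw [hcast, PySem.List.pyRange_one_succ_right (by positivity), List.foldl_append,
      List.foldl_cons, List.foldl_nil, ih,
      inner_full (fun j => f (N : Int) j) m _ (by simp [PySem.List.length_pyRange_one])]
    apply List.map_congr_left
    intro j hj
    obtain ⟨hj0, hjm⟩ := PySem.List.mem_pyRange_one.mp hj
    rw [PySem.List.pyGetD_map_pyRange_of_nonneg _ m j none hj0 hjm, List.foldl_append]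
    simp

-- the optional-seeded row fold equals some of the plain max fold once seeded with a value
theorem foldOpt (g : Int → Int) (l : List Int) : ∀ (x : Int),
    l.foldl (fun o i => pymaxA (g i) o) (some x)
    = some (l.foldl (fun y i => max y (g i)) x) := by
  induction l with
  | nil => intro x; rfl
  | cons i t ih =>
    intro x
    rw [List.foldl_cons, List.foldl_cons]
    show t.foldl (fun o i => pymaxA (g i) o) (some (max (g i) x)) = _
    rw [ih (max (g i) x), max_comm (g i) x]

-- for 0 < N the column fold equals B's max() over the column list
theorem col_eq (f : Int → Int) (N : Int) (hN : 0 < N) :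
    (PySem.List.pyRange 0 N 1).foldl (fun o i => pymaxA (f i) o) none
    = some (match PySem.List.max? ((PySem.List.pyRange 0 N 1).map f) (fun x => x) with
            | some v => v | none => 0) := by
  rw [PySem.List.pyRange_one_cons hN, List.foldl_cons, List.map_cons,
    PySem.List.max?_id_cons]
  show (PySem.List.pyRange (0 + 1) N 1).foldl (fun o i => pymaxA (f i) o) (some (f 0)) = _
  rw [foldOpt, List.foldl_map]

theorem max?_id_append_singleton (l : List Int) (x v : Int)
    (h : PySem.List.max? l (fun y => y) = some v) :
    PySem.List.max? (l ++ [x]) (fun y => y) = some (max v x) := by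
  cases l with
  | nil => simp [PySem.List.max?] at h
  | cons a t =>
    rw [PySem.List.max?_id_cons] at h
    rw [List.cons_append, PySem.List.max?_id_cons, List.foldl_append]
    simp only [List.foldl_cons, List.foldl_nil]
    rw [Option.some_inj.mp h]

-- A's selection loop is first-argmax: max? gives its value, index? its position
theorem selG (s : Int → Int) : ∀ (N : Nat), 1 ≤ N →
    PySem.List.max? ((PySem.List.pyRange 0 (N : Int) 1).map s) (fun x => x)
      = some ((PySem.List.pyRange 0 (N : Int) 1).foldl
          (fun (st : Int × Int) i => if st.1 == -1 || st.2 < s i then (i, s i) else st) (-1, 0)).2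
    ∧ PySem.List.index? ((PySem.List.pyRange 0 (N : Int) 1).map s)
        ((PySem.List.pyRange 0 (N : Int) 1).foldl
          (fun (st : Int × Int) i => if st.1 == -1 || st.2 < s i then (i, s i) else st) (-1, 0)).2
      = some ((PySem.List.pyRange 0 (N : Int) 1).foldl
          (fun (st : Int × Int) i => if st.1 == -1 || st.2 < s i then (i, s i) else st) (-1, 0)).1.toNat
    ∧ 0 ≤ ((PySem.List.pyRange 0 (N : Int) 1).foldl
          (fun (st : Int × Int) i => if st.1 == -1 || st.2 < s i then (i, s i) else st) (-1, 0)).1 := by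
  intro N
  induction N with
  | zero => intro h; omega
  | succ N ih =>
    intro _
    by_cases hN : 1 ≤ N
    · obtain ⟨hmax, hidx, hpos⟩ := ih hN
      have hcast : ((N + 1 : Nat) : Int) = (N : Int) + 1 := by push_cast; ring
      rw [hcast, PySem.List.pyRange_one_succ_right (by positivity), List.map_append,
        List.foldl_append, List.foldl_cons, List.foldl_nil]
      have hlenR : ((PySem.List.pyRange 0 (N : Int) 1).map s).length = N := by
        rw [List.length_map, PySem.List.length_pyRange_one]
        simp
      generalize hst : (PySem.List.pyRange 0 (N : Int) 1).foldl
          (fun (st : Int × Int) i => if st.1 == -1 || st.2 < s i then (i, s i) else st)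
          (-1, 0) = st at hmax hidx hpos ⊢
      by_cases hlt : st.2 < s (N : Int)
      · rw [if_pos (by simp only [Bool.or_eq_true, decide_eq_true_eq]; exact Or.inr hlt)]
        refine ⟨?_, ?_, by positivity⟩
        · rw [List.map_cons, List.map_nil, max?_id_append_singleton _ _ _ hmax,
            max_eq_right hlt.le]
        · have hnotmem : s (N : Int) ∉ (PySem.List.pyRange 0 (N : Int) 1).map s := by
            intro hmem
            have := PySem.List.max?_isMax hmax _ hmem
            omega
          rw [List.map_cons, List.map_nil,
            PySem.List.index?_append_singleton_self _ _ hnotmem, hlenR]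
          simp
      · rw [if_neg (by
            simp only [Bool.or_eq_true, decide_eq_true_eq, beq_iff_eq]
            rintro (h1 | h2)
            · omega
            · exact hlt h2)]
        refine ⟨?_, ?_, hpos⟩
        · rw [List.map_cons, List.map_nil, max?_id_append_singleton _ _ _ hmax,
            max_eq_left (by omega)]
        · have hmem : st.2 ∈ (PySem.List.pyRange 0 (N : Int) 1).map s := by
            rw [← PySem.List.index?_isSome_iff, hidx]
            rfl
          rw [List.map_cons, List.map_nil, PySem.List.index?_append_of_mem _ hmem, hidx]
    · have hN1 : N = 0 := by omega
      subst hN1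
      rw [show ((0 + 1 : Nat) : Int) = 0 + 1 by norm_num, PySem.List.pyRange_one_singleton]
      simp only [List.map_cons, List.map_nil, List.foldl_cons, List.foldl_nil]
      rw [if_pos (by simp)]
      refine ⟨?_, ?_, le_rfl⟩
      · rw [PySem.List.max?_id_cons]
        rfl
      · rw [PySem.List.index?_cons_self]
        rfl

theorem rowA_eq (c : Int → Bool) (m : Int) :
    ((PySem.List.pyRange 0 m 1).foldl (fun (pm : Int × Int) j =>
       ((if c j then pm.1 + 1 else 0), max pm.2 (if c j then pm.1 + 1 else 0))) (0, 0)).2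
    = longestB ((PySem.List.pyRange 0 m 1).map c) := by
  rw [← List.foldl_map (f := c)
    (g := fun (pm : Int × Int) b => ((if b then pm.1 + 1 else 0 : Int),
      max pm.2 (if b then pm.1 + 1 else 0))), dp_eq, longest_eq]

-- A's per-row prefix/max loop equals B's longest over the boolean row
theorem row_eq (v w : Int → Int) (m : Int) :
    ((PySem.List.pyRange 0 m 1).foldl (fun (pm : Int × Int) j =>
        ((if some (v j) == PySem.List.pyGetD ((PySem.List.pyRange 0 m 1).map
              (fun j' => some (w j'))) j none then pm.1 + 1 else 0),
         max pm.2 (if some (v j) == PySem.List.pyGetD ((PySem.List.pyRange 0 m 1).map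
              (fun j' => some (w j'))) j none then pm.1 + 1 else 0))) (0, 0)).2
    = longestB ((PySem.List.pyRange 0 m 1).map
        (fun j => v j == PySem.List.pyGetD ((PySem.List.pyRange 0 m 1).map w) j 0)) := by
  rw [PySem.List.foldl_congr_mem _ _
    (fun (pm : Int × Int) j =>
        ((if v j == PySem.List.pyGetD ((PySem.List.pyRange 0 m 1).map w) j 0
            then pm.1 + 1 else 0 : Int),
         max pm.2 (if v j == PySem.List.pyGetD ((PySem.List.pyRange 0 m 1).map w) j 0
            then pm.1 + 1 else 0))) _
    (by
      intro acc j hj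
      obtain ⟨hj0, hjm⟩ := PySem.List.mem_pyRange_one.mp hj
      beta_reduce
      rw [PySem.List.pyGetD_map_pyRange_of_nonneg _ m j none hj0 hjm,
        PySem.List.pyGetD_map_pyRange_of_nonneg _ m j (0 : Int) hj0 hjm]
      rfl)]
  exact rowA_eq (fun j => v j == PySem.List.pyGetD ((PySem.List.pyRange 0 m 1).map w) j 0) m

-- ===== VERDICT (by name: the statement is the Claim_ definition above) =====
theorem solve_spec : Claim_equal_solve := by
  unfold Claim_equal_solve
  intro A n m _hdom _hpre
  unfold Spec_solve
  by_cases hn : n ≤ 0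
  · simp only [solve, solve_alt, if_pos hn, PySem.List.pyRange_one_eq_nil hn, List.foldl_nil]
    norm_num
  · replace hn : 0 < n := by omega
    simp only [solve, solve_alt, if_neg (by omega : ¬ n ≤ 0)]
    rw [show n = ((n.toNat : Nat) : Int) by omega]
    simp only [outerG]
    have hcol : ∀ (g : Int → Int),
        (PySem.List.pyRange 0 ((n.toNat : Nat) : Int) 1).foldl (fun o i => pymaxA (g i) o) none
        = some (match PySem.List.max?
            ((PySem.List.pyRange 0 ((n.toNat : Nat) : Int) 1).map g) (fun x => x) with
            | some v => v | none => 0) :=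
      fun g => col_eq g _ (by omega)
    simp only [hcol]
    simp only [row_eq]
    obtain ⟨hmax, hidx, hpos⟩ := selG (fun i => longestB ((PySem.List.pyRange 0 m 1).map
      (fun j => PySem.List.pyGetD (PySem.List.pyGetD A i []) j 0 ==
        PySem.List.pyGetD ((PySem.List.pyRange 0 m 1).map (fun j => match PySem.List.max?
          ((PySem.List.pyRange 0 ((n.toNat : Nat) : Int) 1).map
            (fun i => PySem.List.pyGetD (PySem.List.pyGetD A i []) j 0)) (fun x => x) with
          | some v => v | none => 0)) j 0))) n.toNat (by omega)
    simp only [hmax, hidx]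
    simp only [Option.getD_some]
    omega
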